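-- pv_equiv track=rewrite | github.com/bradyz/sandbox | challenges/fbhackercup_2017/zombies.py | solve
-- ===== SOURCE A (Python) =====
-- BOX = [(-1, -1), (-1, 1), (1, -1), (1, 1)]
--
-- def inside(min_x, max_x, min_y, max_y, points):
--     result = set()
--
--     for i in range(len(points)):
--         x, y = points[i]
--         if x >= min_x and x <= max_x and y >= min_y and y <= max_y:
--             result.add(i)
--
--     return result
--
-- def solve(n, r, c):
--     all_boxes = list()
--
--     for x, y in c:
--         for dx, dy in BOX:
--             nx = x + r * dx
--             ny = y + r * dy
--
--             min_x = min(x, nx)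
--             max_x = max(x, nx)
--
--             min_y = min(y, ny)
--             max_y = max(y, ny)
--
--             all_boxes.append(inside(min_x, max_x, min_y, max_y, c))
--
--     result = 0
--
--     for i in range(len(all_boxes)):
--         for j in range(i+1, len(all_boxes)):
--             result = max(result, len(all_boxes[i] | all_boxes[j]))
--
--     return result
-- ===== SOURCE B (Python) =====
-- BOX = [(-1, -1), (-1, 1), (1, -1), (1, 1)]
--
-- def solve(n, r, c):
--     # Inclusion-exclusion |A∪B| = |A| + |B| - |A∩B| with 2D prefix sums over
--     # compressed coordinates: each pair costs O(1) instead of an O(n) set union.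
--     xs = sorted({x for x, _ in c})
--     ys = sorted({y for _, y in c})
--     nx, ny = len(xs), len(ys)
--
--     def lt(vs, v):  # rank: how many compressed values are < v
--         k = 0
--         for u in vs:
--             if u < v:
--                 k += 1
--         return k
--
--     def le(vs, v):  # how many compressed values are <= v
--         k = 0
--         for u in vs:
--             if u <= v:
--                 k += 1
--         return k
--
--     # count points per compressed cell
--     cell = {}
--     for x, y in c:
--         key = (lt(xs, x), lt(ys, y))
--         cell[key] = cell.get(key, 0) + 1
--
--     # P[i][j] = number of points with x-rank < i and y-rank < j
--     prev = [0] * (ny + 1)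
--     P = [prev]
--     for i in range(nx):
--         ps, s = [0], 0
--         for j in range(ny):
--             s += cell.get((i, j), 0)
--             ps.append(s)
--         prev = [a + b for a, b in zip(prev, ps)]
--         P.append(prev)
--
--     def rect(i0, i1, j0, j1):  # points with i0 <= x-rank < i1, j0 <= y-rank < j1
--         if i0 >= i1 or j0 >= j1:
--             return 0
--         return P[i1][j1] - P[i0][j1] - P[i1][j0] + P[i0][j0]
--
--     # each box as a quadruple of rank bounds
--     boxes = []
--     for x, y in c:
--         for dx, dy in BOX:
--             px, py = x + r * dx, y + r * dy
--             boxes.append((lt(xs, min(x, px)), le(xs, max(x, px)),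
--                           lt(ys, min(y, py)), le(ys, max(y, py))))
--     cnt = [rect(i0, i1, j0, j1) for i0, i1, j0, j1 in boxes]
--
--     best = 0
--     for i in range(len(boxes)):
--         a0, a1, b0, b1 = boxes[i]
--         for j in range(i + 1, len(boxes)):
--             c0, c1, d0, d1 = boxes[j]
--             inter = rect(max(a0, c0), min(a1, c1), max(b0, d0), min(b1, d1))
--             u = cnt[i] + cnt[j] - inter
--             if u > best:
--                 best = u
--     return best
-- ===== Notes on version B (the rewrite author's own statement) =====
-- stated objective: faster
-- what changed: Replaces A's per-box index sets and per-pair set unions by inclusion-exclusion |A∪B| = |A| + |B| - |A∩B| over a 2D prefix-sum table on compressed coordinates, so each pair of boxes is evaluated with O(1) table lookups instead of an O(n) set union.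
import Mathlib
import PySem

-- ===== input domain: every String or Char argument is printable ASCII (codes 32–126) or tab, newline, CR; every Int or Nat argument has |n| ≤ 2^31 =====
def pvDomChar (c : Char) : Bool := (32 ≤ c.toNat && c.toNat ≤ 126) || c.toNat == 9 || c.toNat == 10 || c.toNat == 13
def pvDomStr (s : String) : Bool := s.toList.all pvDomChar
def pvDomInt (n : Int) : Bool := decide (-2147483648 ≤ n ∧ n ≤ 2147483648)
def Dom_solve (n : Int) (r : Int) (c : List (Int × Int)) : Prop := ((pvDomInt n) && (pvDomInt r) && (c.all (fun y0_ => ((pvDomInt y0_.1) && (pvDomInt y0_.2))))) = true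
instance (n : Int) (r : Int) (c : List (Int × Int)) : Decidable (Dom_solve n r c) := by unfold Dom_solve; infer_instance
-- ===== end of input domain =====

-- B replaces A's per-box index sets and per-pair set unions by inclusion-exclusion
-- |A∪B| = |A| + |B| - |A∩B| over a 2D prefix-sum table on compressed coordinates,
-- so each pair costs O(1) table lookups instead of an O(n) set union (objective: faster).

-- ===== PORT A =====
def solveBOX : List (Int × Int) := [(-1, -1), (-1, 1), (1, -1), (1, 1)]

def inside (min_x max_x min_y max_y : Int) (points : List (Int × Int)) : PySem.Set Int :=
  (PySem.List.pyRange 0 (PySem.List.len points) 1).foldl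
    (fun result i =>
      let xy := PySem.List.pyGetD points i (0, 0)
      if xy.1 ≥ min_x ∧ xy.1 ≤ max_x ∧ xy.2 ≥ min_y ∧ xy.2 ≤ max_y then
        PySem.Set.add result i
      else result)
    PySem.Set.empty

def solve (n : Int) (r : Int) (c : List (Int × Int)) : Int :=
  let all_boxes : List (PySem.Set Int) :=
    c.foldl (fun all_boxes xy =>
      solveBOX.foldl (fun all_boxes d =>
        let nx := xy.1 + r * d.1
        let ny := xy.2 + r * d.2
        let min_x := min xy.1 nx
        let max_x := max xy.1 nx
        let min_y := min xy.2 ny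
        let max_y := max xy.2 ny
        all_boxes ++ [inside min_x max_x min_y max_y c]) all_boxes) []
  (PySem.List.pyRange 0 (PySem.List.len all_boxes) 1).foldl (fun result i =>
    (PySem.List.pyRange (i + 1) (PySem.List.len all_boxes) 1).foldl (fun result j =>
      max result (PySem.Set.len (PySem.Set.union
        (PySem.List.pyGetD all_boxes i PySem.Set.empty)
        (PySem.List.pyGetD all_boxes j PySem.Set.empty)))) result) 0

-- ===== PORT B =====  (Source B's local helpers lt / le / rect are these top-level helpers)

-- Source B's 'lt(vs, v)': linear count of compressed values < v
def pvLt (vs : List Int) (v : Int) : Int :=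
  vs.foldl (fun k u => if u < v then k + 1 else k) 0

-- Source B's 'le(vs, v)': linear count of compressed values <= v
def pvLe (vs : List Int) (v : Int) : Int :=
  vs.foldl (fun k u => if u ≤ v then k + 1 else k) 0

def pvPget (P : List (List Int)) (i j : Int) : Int :=
  PySem.List.pyGetD (PySem.List.pyGetD P i []) j 0

-- Source B's 'rect(i0, i1, j0, j1)'
def pvRect (P : List (List Int)) (i0 i1 j0 j1 : Int) : Int :=
  if i0 ≥ i1 ∨ j0 ≥ j1 then 0
  else pvPget P i1 j1 - pvPget P i0 j1 - pvPget P i1 j0 + pvPget P i0 j0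

-- Source B's cell-counter loop
def pvCellB (xs ys : List Int) (c : List (Int × Int)) : PySem.Dict (Int × Int) Int :=
  c.foldl (fun d p =>
    let key := (pvLt xs p.1, pvLt ys p.2)
    PySem.Dict.insert d key (PySem.Dict.getD d key 0 + 1)) PySem.Dict.empty

-- Source B's inner row loop: 'ps, s = [0], 0; for j in range(ny): s += cell.get((i,j),0); ps.append(s)'
def pvRowB (cell : PySem.Dict (Int × Int) Int) (ny : Int) (i : Int) : List Int × Int :=
  (PySem.List.pyRange 0 ny 1).foldl (fun ac j =>
    let s := ac.2 + PySem.Dict.getD cell (i, j) 0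
    (ac.1 ++ [s], s)) ([0], 0)

-- Source B's outer prefix loop carrying (prev, P)
def pvTableB (cell : PySem.Dict (Int × Int) Int) (nx ny : Int) : List Int × List (List Int) :=
  (PySem.List.pyRange 0 nx 1).foldl (fun st i =>
    let ps := pvRowB cell ny i
    let prev := (st.1.zip ps.1).map (fun ab => ab.1 + ab.2)
    (prev, st.2 ++ [prev]))
    (List.replicate (ny + 1).toNat 0, [List.replicate (ny + 1).toNat 0])

-- Source B's boxes loop: each box as a quadruple of rank bounds
def pvBoxesB (xs ys : List Int) (r : Int) (c : List (Int × Int)) : List (Int × Int × Int × Int) :=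
  c.foldl (fun bs p =>
    solveBOX.foldl (fun bs d =>
      let px := p.1 + r * d.1
      let py := p.2 + r * d.2
      bs ++ [(pvLt xs (min p.1 px), pvLe xs (max p.1 px),
              pvLt ys (min p.2 py), pvLe ys (max p.2 py))]) bs) []

def solve_alt (n : Int) (r : Int) (c : List (Int × Int)) : Int :=
  let xs := PySem.List.sorted (PySem.Set.ofList (c.map (fun p => p.1))) id
  let ys := PySem.List.sorted (PySem.Set.ofList (c.map (fun p => p.2))) id
  let cell := pvCellB xs ys c
  let P := (pvTableB cell (PySem.List.len xs) (PySem.List.len ys)).2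
  let boxes := pvBoxesB xs ys r c
  let cnt := boxes.map (fun b => pvRect P b.1 b.2.1 b.2.2.1 b.2.2.2)
  (PySem.List.pyRange 0 (PySem.List.len boxes) 1).foldl (fun best i =>
    (PySem.List.pyRange (i + 1) (PySem.List.len boxes) 1).foldl (fun best j =>
      let bi := PySem.List.pyGetD boxes i (0, 0, 0, 0)
      let bj := PySem.List.pyGetD boxes j (0, 0, 0, 0)
      let inter := pvRect P (max bi.1 bj.1) (min bi.2.1 bj.2.1)
                            (max bi.2.2.1 bj.2.2.1) (min bi.2.2.2 bj.2.2.2)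
      let u := PySem.List.pyGetD cnt i 0 + PySem.List.pyGetD cnt j 0 - inter
      if u > best then u else best) best) 0

-- ===== PRECONDITION & SPEC =====
def Spec_solve (n : Int) (r : Int) (c : List (Int × Int)) (out : Int) : Prop := out = solve_alt n r c
instance (n : Int) (r : Int) (c : List (Int × Int)) (out : Int) : Decidable (Spec_solve n r c out) := by unfold Spec_solve; infer_instance

-- ===== CLAIM (what is proved, stated in full; the proofs are below) =====
def Claim_equal_solve : Prop := ∀ (n : Int) (r : Int) (c : List (Int × Int)), Dom_solve n r c → Spec_solve n r c (solve n r c)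

-- ===== LEMMAS AND PROOFS =====

-- the rectangle bounds A and B compute for a point xy and a corner direction d
def pvBounds (r : Int) (xy d : Int × Int) : Int × Int × Int × Int :=
  (min xy.1 (xy.1 + r * d.1), max xy.1 (xy.1 + r * d.1),
   min xy.2 (xy.2 + r * d.2), max xy.2 (xy.2 + r * d.2))

def pvIn (b : Int × Int × Int × Int) (p : Int × Int) : Bool :=
  decide (b.1 ≤ p.1 ∧ p.1 ≤ b.2.1 ∧ b.2.2.1 ≤ p.2 ∧ p.2 ≤ b.2.2.2)

def pvBoxes (r : Int) (c : List (Int × Int)) : List (Int × Int × Int × Int) :=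
  c.flatMap (fun xy => solveBOX.map (pvBounds r xy))

-- ---- proof-side sums over the point list ----
def pvS (c : List (Int × Int)) (f : Int × Int → Int) : Int := (c.map f).sum

theorem pvS_add (c : List (Int × Int)) (f g : Int × Int → Int) :
    pvS c (fun p => f p + g p) = pvS c f + pvS c g :=
  PySem.List.sum_map_add_int c f g

theorem pvS_neg (c : List (Int × Int)) (f : Int × Int → Int) :
    pvS c (fun p => -f p) = -pvS c f := by
  induction c with
  | nil => simp [pvS]
  | cons p ps ih => simp only [pvS, List.map_cons, List.sum_cons] at *; omega

theorem pvS_sub (c : List (Int × Int)) (f g : Int × Int → Int) :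
    pvS c (fun p => f p - g p) = pvS c f - pvS c g := by
  have h := pvS_add c f (fun p => -g p)
  simp only [pvS_neg] at h
  simpa [sub_eq_add_neg] using h

theorem pvS_zero (c : List (Int × Int)) : pvS c (fun _ => 0) = 0 := by
  simp [pvS]

theorem pvS_countP (c : List (Int × Int)) (q : Int × Int → Bool) :
    pvS c (fun p => if q p then (1 : Int) else 0) = (c.countP q : Int) :=
  PySem.List.sum_map_ite_one_zero q c

theorem pvS_congr (c : List (Int × Int)) (f g : Int × Int → Int)
    (h : ∀ p ∈ c, f p = g p) : pvS c f = pvS c g := by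
  unfold pvS; rw [List.map_congr_left h]

-- ---- rank-count facts ----
theorem pv_count_fold (v : Int) (q : Int → Bool) :
    ∀ (l : List Int) (a : Int),
    l.foldl (fun k u => if q u then k + 1 else k) a = a + (l.countP q : Int) := by
  intro l
  induction l with
  | nil => intro a; simp
  | cons u us ih =>
    intro a
    rw [List.foldl_cons, List.countP_cons]
    cases h : q u <;> simp [h, ih] <;> push_cast <;> ring

theorem pvLt_eq (vs : List Int) (v : Int) :
    pvLt vs v = (vs.countP (fun u => decide (u < v)) : Int) := by
  unfold pvLt
  have h := pv_count_fold v (fun u => decide (u < v)) vs 0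
  simp only [decide_eq_true_eq] at h
  simpa using h

theorem pvLe_eq (vs : List Int) (v : Int) :
    pvLe vs v = (vs.countP (fun u => decide (u ≤ v)) : Int) := by
  unfold pvLe
  have h := pv_count_fold v (fun u => decide (u ≤ v)) vs 0
  simp only [decide_eq_true_eq] at h
  simpa using h

theorem pvLt_mono (vs : List Int) (a b : Int) (h : a ≤ b) :
    pvLt vs a ≤ pvLt vs b := by
  rw [pvLt_eq, pvLt_eq]
  exact_mod_cast List.countP_mono_left (fun x _ hx => by
    simp only [decide_eq_true_eq] at *; omega)

theorem pvLe_mono (vs : List Int) (a b : Int) (h : a ≤ b) :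
    pvLe vs a ≤ pvLe vs b := by
  rw [pvLe_eq, pvLe_eq]
  exact_mod_cast List.countP_mono_left (fun x _ hx => by
    simp only [decide_eq_true_eq] at *; omega)

theorem pvLt_max (vs : List Int) (a b : Int) :
    pvLt vs (max a b) = max (pvLt vs a) (pvLt vs b) := by
  rcases le_total a b with h | h
  · rw [max_eq_right h, max_eq_right (pvLt_mono vs a b h)]
  · rw [max_eq_left h, max_eq_left (pvLt_mono vs b a h)]

theorem pvLe_min (vs : List Int) (a b : Int) :
    pvLe vs (min a b) = min (pvLe vs a) (pvLe vs b) := by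
  rcases le_total a b with h | h
  · rw [min_eq_left h, min_eq_left (pvLe_mono vs a b h)]
  · rw [min_eq_right h, min_eq_right (pvLe_mono vs b a h)]

theorem pvLt_nonneg (vs : List Int) (v : Int) : 0 ≤ pvLt vs v := by
  rw [pvLt_eq]; exact_mod_cast Nat.zero_le _
theorem pvLt_le_len (vs : List Int) (v : Int) : pvLt vs v ≤ (vs.length : Int) := by
  rw [pvLt_eq]; exact_mod_cast List.countP_le_length
theorem pvLe_nonneg (vs : List Int) (v : Int) : 0 ≤ pvLe vs v := by
  rw [pvLe_eq]; exact_mod_cast Nat.zero_le _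
theorem pvLe_le_len (vs : List Int) (v : Int) : pvLe vs v ≤ (vs.length : Int) := by
  rw [pvLe_eq]; exact_mod_cast List.countP_le_length

theorem pv_countP_split (p q : Int → Bool) (hd : ∀ u, ¬(p u = true ∧ q u = true)) :
    ∀ (vs : List Int), vs.countP (fun u => p u || q u) = vs.countP p + vs.countP q := by
  intro vs
  induction vs with
  | nil => simp
  | cons u us ih =>
    simp only [List.countP_cons]
    cases hp : p u <;> cases hq : q u <;> simp [hp, hq, ih] <;> first | omega | exact absurd ⟨hp, hq⟩ (hd u)

-- with v ∈ vs and vs Nodup: countP (< v or = v) = countP (< v) + 1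
theorem pv_countP_lt_succ (vs : List Int) (hnd : vs.Nodup) (v : Int) (hv : v ∈ vs) :
    vs.countP (fun u => decide (u < v) || decide (u = v))
      = vs.countP (fun u => decide (u < v)) + 1 := by
  rw [pv_countP_split _ _ (by intro u h; simp only [decide_eq_true_eq] at h; omega)]
  have h1 : vs.countP (fun u => decide (u = v)) = vs.count v := by
    rw [List.count]
    exact List.countP_congr (fun x _ => by simp [beq_iff_eq])
  rw [h1, List.count_eq_one_of_mem hnd hv]

theorem pvLt_lt_pvLe_iff (vs : List Int) (hnd : vs.Nodup) (v h : Int) (hv : v ∈ vs) :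
    pvLt vs v < pvLe vs h ↔ v ≤ h := by
  rw [pvLt_eq, pvLe_eq]
  constructor
  · intro hlt
    by_contra hc
    push_neg at hc
    have := List.countP_mono_left (l := vs)
      (p := fun u => decide (u ≤ h)) (q := fun u => decide (u < v))
      (fun x _ hx => by simp only [decide_eq_true_eq] at *; omega)
    omega
  · intro hvh
    have h2 : vs.countP (fun u => decide (u < v) || decide (u = v))
        ≤ vs.countP (fun u => decide (u ≤ h)) :=
      List.countP_mono_left (fun x _ hx => by
        simp only [Bool.or_eq_true, decide_eq_true_eq] at *; omega)
    rw [pv_countP_lt_succ vs hnd v hv] at h2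
    omega

theorem pvLt_le_pvLt_iff (vs : List Int) (hnd : vs.Nodup) (l v : Int) (hv : v ∈ vs) :
    pvLt vs l ≤ pvLt vs v ↔ l ≤ v := by
  rw [pvLt_eq, pvLt_eq]
  constructor
  · intro hle
    by_contra hc
    push_neg at hc
    have h2 : vs.countP (fun u => decide (u < v) || decide (u = v))
        ≤ vs.countP (fun u => decide (u < l)) :=
      List.countP_mono_left (fun x _ hx => by
        simp only [Bool.or_eq_true, decide_eq_true_eq] at *; omega)
    rw [pv_countP_lt_succ vs hnd v hv] at h2
    omega
  · intro hlv
    exact_mod_cast List.countP_mono_left (fun x _ hx => by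
      simp only [decide_eq_true_eq] at *; omega)

-- ---- the cell counter counts points per rank pair ----
theorem pvCellB_getD (xs ys : List Int) (c : List (Int × Int)) (key : Int × Int) :
    (pvCellB xs ys c).getD key 0
      = (c.countP (fun p => (pvLt xs p.1, pvLt ys p.2) == key) : Int) := by
  have hrw : pvCellB xs ys c
      = ((c.map (fun p => (pvLt xs p.1, pvLt ys p.2))).foldl
          (fun d x => PySem.Dict.insert d x (PySem.Dict.getD d x 0 + 1)) PySem.Dict.empty) := by
    rw [List.foldl_map]; rfl
  rw [hrw]
  rw [PySem.Dict.getD_foldl_insert_add_one]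
  rw [PySem.Dict.getD_empty]
  rw [List.count, List.countP_map]
  simp [Function.comp_def]

-- ---- the prefix table: spec values ----
def pvRowSum (cell : PySem.Dict (Int × Int) Int) (i : Int) (t : Nat) : Int :=
  ((List.range t).map (fun j => cell.getD (i, (j : Int)) 0)).sum

def pvPD (cell : PySem.Dict (Int × Int) Int) (ny : Nat) (i t : Nat) : Int :=
  ((List.range i).map (fun i' => pvRowSum cell (i' : Int) t)).sum

def pvRowD (cell : PySem.Dict (Int × Int) Int) (ny : Nat) (i : Nat) : List Int :=
  (List.range (ny + 1)).map (fun t => pvPD cell ny i t)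

theorem pvRowB_eq (cell : PySem.Dict (Int × Int) Int) (m : Nat) (i : Int) :
    pvRowB cell (m : Int) i
      = ((List.range (m + 1)).map (fun t => pvRowSum cell i t), pvRowSum cell i m) := by
  induction m with
  | zero =>
    rw [pvRowB, show ((0 : Nat) : Int) = 0 from rfl, PySem.List.pyRange_one_eq_nil (by omega)]
    simp [pvRowSum]
  | succ m ih =>
    have hsplit : PySem.List.pyRange 0 ((m + 1 : Nat) : Int) 1
        = PySem.List.pyRange 0 (m : Int) 1 ++ [(m : Int)] := by
      push_cast
      exact PySem.List.pyRange_one_succ_right (by positivity)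
    have hstep : pvRowSum cell i (m + 1) = pvRowSum cell i m + cell.getD (i, (m : Int)) 0 := by
      simp [pvRowSum, List.range_succ]
    rw [pvRowB, hsplit, List.foldl_append]
    rw [show (PySem.List.pyRange 0 (m : Int) 1).foldl (fun ac j =>
          let s := ac.2 + PySem.Dict.getD cell (i, j) 0
          (ac.1 ++ [s], s)) ([0], 0) = pvRowB cell (m : Int) i from rfl]
    rw [ih]
    simp only [List.foldl_cons, List.foldl_nil]
    rw [Prod.mk.injEq]
    constructor
    · rw [List.range_succ (n := m + 1), List.map_append, List.map_cons, List.map_nil, hstep]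
    · rw [hstep]

theorem pvRowD_succ (cell : PySem.Dict (Int × Int) Int) (ny : Nat) (i : Nat) :
    pvRowD cell ny (i + 1)
      = ((pvRowD cell ny i).zip ((List.range (ny + 1)).map
          (fun t => pvRowSum cell (i : Int) t))).map (fun ab => ab.1 + ab.2) := by
  unfold pvRowD
  rw [List.zip_map', List.map_map]
  refine List.map_congr_left ?_
  intro t _
  simp [pvPD, List.range_succ]

theorem pvTableB_eq (cell : PySem.Dict (Int × Int) Int) (nx ny : Nat) :
    pvTableB cell (nx : Int) (ny : Int)
      = (pvRowD cell ny nx, (List.range (nx + 1)).map (pvRowD cell ny)) := by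
  have hrep : List.replicate (((ny : Nat) : Int) + 1).toNat (0 : Int) = pvRowD cell ny 0 := by
    have h1 : (((ny : Nat) : Int) + 1).toNat = ny + 1 := by omega
    rw [h1]
    unfold pvRowD pvPD
    simp
  induction nx with
  | zero =>
    rw [pvTableB, show ((0 : Nat) : Int) = 0 from rfl, PySem.List.pyRange_one_eq_nil (by omega)]
    simp only [List.foldl_nil, hrep]
    simp
  | succ nx ih =>
    have hsplit : PySem.List.pyRange 0 ((nx + 1 : Nat) : Int) 1
        = PySem.List.pyRange 0 (nx : Int) 1 ++ [(nx : Int)] := by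
      push_cast
      exact PySem.List.pyRange_one_succ_right (by positivity)
    have hstep : pvTableB cell ((nx + 1 : Nat) : Int) (ny : Int)
        = (let st := pvTableB cell (nx : Int) (ny : Int)
           let ps := pvRowB cell (ny : Int) (nx : Int)
           let prev := (st.1.zip ps.1).map (fun ab => ab.1 + ab.2)
           (prev, st.2 ++ [prev])) := by
      conv_lhs => rw [pvTableB, hsplit, List.foldl_append]
      conv_rhs => rw [pvTableB]
      simp only [List.foldl_cons, List.foldl_nil]
    rw [hstep, ih]
    rw [pvRowB_eq cell ny (nx : Int)]
    simp only []
    rw [Prod.mk.injEq]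
    constructor
    · exact (pvRowD_succ cell ny nx).symm
    · rw [← pvRowD_succ cell ny nx, List.range_succ (n := nx + 1),
        List.map_append, List.map_cons, List.map_nil]

theorem pvPget_table (cell : PySem.Dict (Int × Int) Int) (nx ny : Nat) (i j : Int)
    (hi0 : 0 ≤ i) (hi1 : i ≤ (nx : Int)) (hj0 : 0 ≤ j) (hj1 : j ≤ (ny : Int)) :
    pvPget ((pvTableB cell (nx : Int) (ny : Int)).2) i j = pvPD cell ny i.toNat j.toNat := by
  rw [pvTableB_eq]
  unfold pvPget
  have hilen : i < (((List.range (nx + 1)).map (pvRowD cell ny)).length : Int) := by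
    simp; omega
  rw [PySem.List.pyGetD_eq_getElem _ _ hi0 hilen]
  rw [List.getElem_map, List.getElem_range]
  have hjlen : j < (((List.range (ny + 1)).map (fun t => pvPD cell ny i.toNat t)).length : Int) := by
    simp; omega
  rw [show pvRowD cell ny i.toNat = (List.range (ny + 1)).map (fun t => pvPD cell ny i.toNat t)
    from rfl]
  rw [PySem.List.pyGetD_eq_getElem _ _ hj0 hjlen]
  rw [List.getElem_map, List.getElem_range]

-- pvPD over the cell counter counts points with small ranks
theorem pvRowSum_points (xs ys : List Int) (c : List (Int × Int)) (iv : Int) (t : Nat) :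
    pvRowSum (pvCellB xs ys c) iv t
      = pvS c (fun p => if pvLt xs p.1 = iv ∧ pvLt ys p.2 < (t : Int) then 1 else 0) := by
  induction t with
  | zero =>
    rw [show pvRowSum (pvCellB xs ys c) iv 0 = 0 by simp [pvRowSum]]
    rw [pvS_congr _ _ (fun _ => 0) (fun p _ => by
      have := pvLt_nonneg ys p.2
      rw [if_neg (by push_cast; omega)])]
    rw [pvS_zero]
  | succ t ih =>
    have hstep : pvRowSum (pvCellB xs ys c) iv (t + 1)
        = pvRowSum (pvCellB xs ys c) iv t + (pvCellB xs ys c).getD (iv, (t : Int)) 0 := by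
      simp [pvRowSum, List.range_succ]
    rw [hstep, ih, pvCellB_getD, ← pvS_countP c (fun p => (pvLt xs p.1, pvLt ys p.2) == (iv, (t : Int))),
      ← pvS_add]
    refine pvS_congr _ _ _ (fun p _ => ?_)
    have h1 : ((pvLt xs p.1, pvLt ys p.2) == (iv, (t : Int)))
        = decide (pvLt xs p.1 = iv ∧ pvLt ys p.2 = (t : Int)) := by
      cases h1 : decide (pvLt xs p.1 = iv) <;> cases h2 : decide (pvLt ys p.2 = (t : Int)) <;>
        simp_all [Prod.ext_iff]
    rw [h1]
    push_cast
    split_ifs <;> simp_all <;> omega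

theorem pvPD_points (xs ys : List Int) (c : List (Int × Int)) (ny : Nat) (i t : Nat) :
    pvPD (pvCellB xs ys c) ny i t
      = pvS c (fun p => if pvLt xs p.1 < (i : Int) ∧ pvLt ys p.2 < (t : Int) then 1 else 0) := by
  induction i with
  | zero =>
    rw [show pvPD (pvCellB xs ys c) ny 0 t = 0 by simp [pvPD]]
    rw [pvS_congr _ _ (fun _ => 0) (fun p _ => by
      have := pvLt_nonneg xs p.1
      rw [if_neg (by push_cast; omega)])]
    rw [pvS_zero]
  | succ i ih =>
    have hstep : pvPD (pvCellB xs ys c) ny (i + 1) t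
        = pvPD (pvCellB xs ys c) ny i t + pvRowSum (pvCellB xs ys c) (i : Int) t := by
      simp [pvPD, List.range_succ]
    rw [hstep, ih, pvRowSum_points, ← pvS_add]
    refine pvS_congr _ _ _ (fun p _ => ?_)
    push_cast
    split_ifs <;> omega

-- ---- the rectangle query counts the points inside the rectangle ----
theorem pv_query (xs ys : List Int) (c : List (Int × Int))
    (hxs : xs.Nodup) (hys : ys.Nodup)
    (hxc : ∀ p ∈ c, p.1 ∈ xs) (hyc : ∀ p ∈ c, p.2 ∈ ys)
    (lx hx ly hy : Int) :
    pvRect ((pvTableB (pvCellB xs ys c) (xs.length : Int) (ys.length : Int)).2)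
        (pvLt xs lx) (pvLe xs hx) (pvLt ys ly) (pvLe ys hy)
      = pvS c (fun p => if lx ≤ p.1 ∧ p.1 ≤ hx ∧ ly ≤ p.2 ∧ p.2 ≤ hy then 1 else 0) := by
  unfold pvRect
  by_cases hg : pvLt xs lx ≥ pvLe xs hx ∨ pvLt ys ly ≥ pvLe ys hy
  · rw [if_pos hg]
    symm
    rw [pvS_congr _ _ (fun _ => 0) (fun p hp => by
      by_cases hc : lx ≤ p.1 ∧ p.1 ≤ hx ∧ ly ≤ p.2 ∧ p.2 ≤ hy
      · exfalso
        have h1 := (pvLt_le_pvLt_iff xs hxs lx p.1 (hxc p hp)).mpr hc.1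
        have h2 := (pvLt_lt_pvLe_iff xs hxs p.1 hx (hxc p hp)).mpr hc.2.1
        have h3 := (pvLt_le_pvLt_iff ys hys ly p.2 (hyc p hp)).mpr hc.2.2.1
        have h4 := (pvLt_lt_pvLe_iff ys hys p.2 hy (hyc p hp)).mpr hc.2.2.2
        omega
      · rw [if_neg hc])]
    exact pvS_zero c
  · rw [if_neg hg]
    push_neg at hg
    rw [pvPget_table _ xs.length ys.length _ _ (pvLe_nonneg xs hx) (pvLe_le_len xs hx)
        (pvLe_nonneg ys hy) (pvLe_le_len ys hy),
      pvPget_table _ xs.length ys.length _ _ (pvLt_nonneg xs lx) (pvLt_le_len xs lx)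
        (pvLe_nonneg ys hy) (pvLe_le_len ys hy),
      pvPget_table _ xs.length ys.length _ _ (pvLe_nonneg xs hx) (pvLe_le_len xs hx)
        (pvLt_nonneg ys ly) (pvLt_le_len ys ly),
      pvPget_table _ xs.length ys.length _ _ (pvLt_nonneg xs lx) (pvLt_le_len xs lx)
        (pvLt_nonneg ys ly) (pvLt_le_len ys ly)]
    rw [pvPD_points, pvPD_points, pvPD_points, pvPD_points]
    simp only [Int.toNat_of_nonneg (pvLe_nonneg xs hx), Int.toNat_of_nonneg (pvLt_nonneg xs lx),
      Int.toNat_of_nonneg (pvLe_nonneg ys hy), Int.toNat_of_nonneg (pvLt_nonneg ys ly)]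
    rw [← pvS_sub, ← pvS_sub, ← pvS_add]
    refine pvS_congr _ _ _ (fun p hp => ?_)
    have h1 := pvLt_le_pvLt_iff xs hxs lx p.1 (hxc p hp)
    have h2 := pvLt_lt_pvLe_iff xs hxs p.1 hx (hxc p hp)
    have h3 := pvLt_le_pvLt_iff ys hys ly p.2 (hyc p hp)
    have h4 := pvLt_lt_pvLe_iff ys hys p.2 hy (hyc p hp)
    have hbox : (lx ≤ p.1 ∧ p.1 ≤ hx ∧ ly ≤ p.2 ∧ p.2 ≤ hy)
        ↔ (pvLt xs lx ≤ pvLt xs p.1 ∧ pvLt xs p.1 < pvLe xs hx ∧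
           pvLt ys ly ≤ pvLt ys p.2 ∧ pvLt ys p.2 < pvLe ys hy) := by
      constructor
      · intro hc; exact ⟨h1.mpr hc.1, h2.mpr hc.2.1, h3.mpr hc.2.2.1, h4.mpr hc.2.2.2⟩
      · intro hc; exact ⟨h1.mp hc.1, h2.mp hc.2.1, h3.mp hc.2.2.1, h4.mp hc.2.2.2⟩
    simp only [hbox]
    split_ifs <;> omega

-- ---- A-side: |union of two boxes' index sets| = count of points in either box ----
theorem pv_fold_add_filter (P : Int → Prop) [DecidablePred P] :
    ∀ (idxs : List Int) (s : PySem.Set Int), idxs.Nodup → (∀ i ∈ idxs, i ∉ s) →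
    idxs.foldl (fun s i => if P i then PySem.Set.add s i else s) s
    = s ++ idxs.filter (fun i => decide (P i)) := by
  intro idxs
  induction idxs with
  | nil => intro s _ _; simp
  | cons i is ih =>
    intro s hnd hdisj
    rcases List.nodup_cons.mp hnd with ⟨hnotmem, hnd'⟩
    rw [List.foldl_cons]
    by_cases h : P i
    · rw [if_pos h, PySem.Set.add_of_not_mem (hdisj i (List.mem_cons_self))]
      rw [ih (s ++ [i]) hnd' ?_]
      · simp [List.filter_cons, h, List.append_assoc]
      · intro j hj
        simp only [List.mem_append, List.mem_singleton]
        rintro (hjs | rfl)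
        · exact hdisj j (List.mem_cons_of_mem _ hj) hjs
        · exact hnotmem hj
    · rw [if_neg h, ih s hnd' (fun j hj => hdisj j (List.mem_cons_of_mem _ hj))]
      simp [List.filter_cons, h]

theorem pv_inside_eq (b : Int × Int × Int × Int) (c : List (Int × Int)) :
    inside b.1 b.2.1 b.2.2.1 b.2.2.2 c
    = (PySem.List.pyRange 0 (c.length : Int) 1).filter
        (fun i => pvIn b (PySem.List.pyGetD c i (0, 0))) := by
  have h := pv_fold_add_filter
    (fun i => (PySem.List.pyGetD c i ((0 : Int), (0 : Int))).1 ≥ b.1 ∧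
      (PySem.List.pyGetD c i ((0 : Int), (0 : Int))).1 ≤ b.2.1 ∧
      (PySem.List.pyGetD c i ((0 : Int), (0 : Int))).2 ≥ b.2.2.1 ∧
      (PySem.List.pyGetD c i ((0 : Int), (0 : Int))).2 ≤ b.2.2.2)
    (PySem.List.pyRange 0 (PySem.List.len c) 1) PySem.Set.empty
    (PySem.List.nodup_pyRange_one _ _) (fun i _ hmem => by simp [PySem.Set.empty] at hmem)
  refine Eq.trans h ?_
  rw [show (PySem.Set.empty : PySem.Set Int) = ([] : List Int) from rfl, List.nil_append]
  refine List.filter_congr ?_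
  intro i _
  simp only [pvIn]

theorem pv_union_len (idxs : List Int) (hnd : idxs.Nodup) (pb qb : Int → Bool) :
    PySem.Set.len (PySem.Set.union (idxs.filter pb) (idxs.filter qb))
    = (idxs.countP (fun i => pb i || qb i) : Int) := by
  have ht : (idxs.filter qb).Nodup := hnd.filter _
  show PySem.Set.len (PySem.Set.update (idxs.filter pb) (idxs.filter qb)) = _
  rw [PySem.Set.update_eq_append_filter, PySem.Set.ofList_eq_self_of_nodup _ ht]
  have hc : ∀ y ∈ idxs.filter qb,
      (!(PySem.Set.contains (idxs.filter pb) y)) = !pb y := by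
    intro y hy
    rcases List.mem_filter.mp hy with ⟨hyi, hyq⟩
    cases hpb : pb y
    · have hnm : y ∉ idxs.filter pb := by
        intro hmem
        rcases List.mem_filter.mp hmem with ⟨_, hpb'⟩
        rw [hpb] at hpb'; exact Bool.false_ne_true hpb'
      have hcf : PySem.Set.contains (idxs.filter pb) y = false := by
        rw [← Bool.not_eq_true, PySem.Set.contains_iff]; exact hnm
      rw [hcf]
    · have hm : y ∈ idxs.filter pb := List.mem_filter.mpr ⟨hyi, hpb⟩
      have hct : PySem.Set.contains (idxs.filter pb) y = true :=
        (PySem.Set.contains_iff _ _).mpr hm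
      rw [hct]
  rw [List.filter_congr hc, List.filter_filter]
  have key : ∀ (l : List Int),
      l.countP pb + l.countP (fun y => !pb y && qb y) = l.countP (fun i => pb i || qb i) := by
    intro l
    induction l with
    | nil => simp
    | cons x xs ihl =>
      cases h1 : pb x <;> cases h2 : qb x <;>
        simp [List.countP_cons, h1, h2] <;> omega
  simp only [PySem.Set.len, List.length_append]
  rw [← key idxs]
  push_cast
  rw [List.countP_eq_length_filter, List.countP_eq_length_filter]

theorem pv_countP_range (c : List (Int × Int)) (pr : Int × Int → Bool) :
    (PySem.List.pyRange 0 (c.length : Int) 1).countP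
      (fun i => pr (PySem.List.pyGetD c i (0, 0))) = c.countP pr := by
  conv_rhs => rw [← PySem.List.map_pyGetD_pyRange_zero c ((0 : Int), (0 : Int))]
  rw [List.countP_map]
  rfl

theorem pv_coreA (b b' : Int × Int × Int × Int) (c : List (Int × Int)) :
    PySem.Set.len (PySem.Set.union
      (inside b.1 b.2.1 b.2.2.1 b.2.2.2 c) (inside b'.1 b'.2.1 b'.2.2.1 b'.2.2.2 c))
    = (c.countP (fun p => pvIn b p || pvIn b' p) : Int) := by
  rw [pv_inside_eq, pv_inside_eq]
  rw [pv_union_len _ (PySem.List.nodup_pyRange_one _ _)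
    (fun i => pvIn b (PySem.List.pyGetD c i (0, 0)))
    (fun i => pvIn b' (PySem.List.pyGetD c i (0, 0)))]
  rw [← pv_countP_range c (fun p => pvIn b p || pvIn b' p)]

-- ---- B-side: per-pair inclusion-exclusion value ----
theorem pv_pairB (xs ys : List Int) (c : List (Int × Int))
    (hxs : xs.Nodup) (hys : ys.Nodup)
    (hxc : ∀ p ∈ c, p.1 ∈ xs) (hyc : ∀ p ∈ c, p.2 ∈ ys)
    (b b' : Int × Int × Int × Int) :
    (let P := (pvTableB (pvCellB xs ys c) (xs.length : Int) (ys.length : Int)).2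
     let q := fun (bb : Int × Int × Int × Int) =>
       (pvLt xs bb.1, pvLe xs bb.2.1, pvLt ys bb.2.2.1, pvLe ys bb.2.2.2)
     pvRect P (q b).1 (q b).2.1 (q b).2.2.1 (q b).2.2.2
       + pvRect P (q b').1 (q b').2.1 (q b').2.2.1 (q b').2.2.2
       - pvRect P (max (q b).1 (q b').1) (min (q b).2.1 (q b').2.1)
           (max (q b).2.2.1 (q b').2.2.1) (min (q b).2.2.2 (q b').2.2.2))
    = (c.countP (fun p => pvIn b p || pvIn b' p) : Int) := by
  simp only []
  rw [← pvLt_max xs b.1 b'.1, ← pvLe_min xs b.2.1 b'.2.1,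
    ← pvLt_max ys b.2.2.1 b'.2.2.1, ← pvLe_min ys b.2.2.2 b'.2.2.2]
  rw [pv_query xs ys c hxs hys hxc hyc b.1 b.2.1 b.2.2.1 b.2.2.2,
    pv_query xs ys c hxs hys hxc hyc b'.1 b'.2.1 b'.2.2.1 b'.2.2.2,
    pv_query xs ys c hxs hys hxc hyc (max b.1 b'.1) (min b.2.1 b'.2.1)
      (max b.2.2.1 b'.2.2.1) (min b.2.2.2 b'.2.2.2)]
  rw [← pvS_countP c (fun p => pvIn b p || pvIn b' p)]
  rw [← pvS_add, ← pvS_sub]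
  refine pvS_congr _ _ _ (fun p _ => ?_)
  simp only [pvIn, Bool.or_eq_true, decide_eq_true_eq]
  split_ifs <;> omega

-- ---- the main equality ----
theorem pv_main (n r : Int) (c : List (Int × Int)) : solve n r c = solve_alt n r c := by
  simp only [solve, solve_alt]
  set xs := PySem.List.sorted (PySem.Set.ofList (c.map fun p => p.1)) id with hxsdef
  set ys := PySem.List.sorted (PySem.Set.ofList (c.map fun p => p.2)) id with hysdef
  have hnodx : xs.Nodup :=
    ((PySem.List.sorted_perm _ _ _).nodup_iff).mpr (PySem.Set.nodup_ofList _)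
  have hnody : ys.Nodup :=
    ((PySem.List.sorted_perm _ _ _).nodup_iff).mpr (PySem.Set.nodup_ofList _)
  have hxc : ∀ p ∈ c, p.1 ∈ xs := fun p hp =>
    ((PySem.List.sorted_perm _ _ _).mem_iff).mpr
      ((PySem.Set.mem_ofList _ _).mpr (List.mem_map_of_mem hp))
  have hyc : ∀ p ∈ c, p.2 ∈ ys := fun p hp =>
    ((PySem.List.sorted_perm _ _ _).mem_iff).mpr
      ((PySem.Set.mem_ofList _ _).mpr (List.mem_map_of_mem hp))
  have hinA : ∀ (acc : List (PySem.Set Int)) (xy : Int × Int),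
      solveBOX.foldl (fun acc d => acc ++
        [inside (min xy.1 (xy.1 + r * d.1)) (max xy.1 (xy.1 + r * d.1))
          (min xy.2 (xy.2 + r * d.2)) (max xy.2 (xy.2 + r * d.2)) c]) acc
      = acc ++ solveBOX.map (fun d =>
          inside (pvBounds r xy d).1 (pvBounds r xy d).2.1 (pvBounds r xy d).2.2.1
            (pvBounds r xy d).2.2.2 c) := by
    intro acc xy
    exact PySem.List.foldl_append_singleton_eq_map
      (fun d => inside (pvBounds r xy d).1 (pvBounds r xy d).2.1 (pvBounds r xy d).2.2.1
        (pvBounds r xy d).2.2.2 c) solveBOX acc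
  have hA : c.foldl (fun all_boxes xy =>
        solveBOX.foldl (fun all_boxes d => all_boxes ++
          [inside (min xy.1 (xy.1 + r * d.1)) (max xy.1 (xy.1 + r * d.1))
            (min xy.2 (xy.2 + r * d.2)) (max xy.2 (xy.2 + r * d.2)) c]) all_boxes)
        ([] : List (PySem.Set Int))
      = (pvBoxes r c).map (fun b => inside b.1 b.2.1 b.2.2.1 b.2.2.2 c) := by
    rw [PySem.List.foldl_congr_mem c _
      (fun acc xy => acc ++ solveBOX.map (fun d =>
        inside (pvBounds r xy d).1 (pvBounds r xy d).2.1 (pvBounds r xy d).2.2.1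
          (pvBounds r xy d).2.2.2 c)) [] (fun acc xy _ => hinA acc xy)]
    rw [PySem.List.foldl_append_eq_flatMap]
    simp only [pvBoxes, List.map_flatMap, List.map_map, List.nil_append]
    rfl
  have hinB : ∀ (acc : List (Int × Int × Int × Int)) (xy : Int × Int),
      solveBOX.foldl (fun acc d => acc ++
        [(pvLt xs (min xy.1 (xy.1 + r * d.1)), pvLe xs (max xy.1 (xy.1 + r * d.1)),
          pvLt ys (min xy.2 (xy.2 + r * d.2)), pvLe ys (max xy.2 (xy.2 + r * d.2)))]) acc
      = acc ++ solveBOX.map (fun d =>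
          (pvLt xs (pvBounds r xy d).1, pvLe xs (pvBounds r xy d).2.1,
           pvLt ys (pvBounds r xy d).2.2.1, pvLe ys (pvBounds r xy d).2.2.2)) := by
    intro acc xy
    exact PySem.List.foldl_append_singleton_eq_map
      (fun d => (pvLt xs (pvBounds r xy d).1, pvLe xs (pvBounds r xy d).2.1,
        pvLt ys (pvBounds r xy d).2.2.1, pvLe ys (pvBounds r xy d).2.2.2)) solveBOX acc
  have hB : pvBoxesB xs ys r c = (pvBoxes r c).map (fun b =>
      (pvLt xs b.1, pvLe xs b.2.1, pvLt ys b.2.2.1, pvLe ys b.2.2.2)) := by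
    simp only [pvBoxesB]
    rw [PySem.List.foldl_congr_mem c _
      (fun acc xy => acc ++ solveBOX.map (fun d =>
        (pvLt xs (pvBounds r xy d).1, pvLe xs (pvBounds r xy d).2.1,
         pvLt ys (pvBounds r xy d).2.2.1, pvLe ys (pvBounds r xy d).2.2.2))) []
      (fun acc xy _ => hinB acc xy)]
    rw [PySem.List.foldl_append_eq_flatMap]
    simp only [pvBoxes, List.map_flatMap, List.map_map, List.nil_append]
    rfl
  rw [hA, hB]
  simp only [List.map_map, Function.comp_def, PySem.List.len_eq, List.length_map]
  refine PySem.List.foldl_congr_mem _ _ _ _ ?_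
  intro acc i hi
  refine PySem.List.foldl_congr_mem _ _ _ _ ?_
  intro acc' j hj
  rcases PySem.List.mem_pyRange_one.mp hi with ⟨hi0, hilt⟩
  rcases PySem.List.mem_pyRange_one.mp hj with ⟨hj1, hjlt⟩
  rw [PySem.List.pyGetD_eq_getElem _ _ hi0 (by simpa using hilt),
      PySem.List.pyGetD_eq_getElem _ _ (by omega) (by simpa using hjlt),
      PySem.List.pyGetD_eq_getElem _ _ hi0 (by simpa using hilt),
      PySem.List.pyGetD_eq_getElem _ _ (by omega) (by simpa using hjlt),
      PySem.List.pyGetD_eq_getElem _ _ hi0 (by simpa using hilt),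
      PySem.List.pyGetD_eq_getElem _ _ (by omega) (by simpa using hjlt)]
  simp only [List.getElem_map]
  rw [pv_coreA]
  have hpair := pv_pairB xs ys c hnodx hnody hxc hyc
    ((pvBoxes r c)[i.toNat]'(by omega))
    ((pvBoxes r c)[j.toNat]'(by omega))
  simp only [] at hpair
  rw [hpair]
  split_ifs with hgt
  · exact max_eq_right hgt.le
  · exact max_eq_left (not_lt.mp hgt)

-- ===== VERDICT (by name: the statement is the Claim_ definition above) =====
theorem solve_spec : Claim_equal_solve := by
  intro n r c _
  unfold Spec_solve
  exact pv_main n r c
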